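-- pv_equiv track=rewrite | github.com/akashrkgupta30/automated-youtube-video-upload-with-ai-text-generation | youtube_main.py | limit_tag_length
-- ===== SOURCE A (Python) =====
-- def limit_tag_length(tag_string, max_length=500):
--     tags = tag_string.split(' ')
--     limited_tags = []
--     current_length = 0
--
--     for tag in tags:
--         if current_length + len(tag) + 1 <= max_length:
--             limited_tags.append(tag)
--             current_length += len(tag) + 1
--         else:
--             break
--
--     return limited_tags
-- ===== SOURCE B (Python) =====
-- def limit_tag_length(tag_string, max_length=500):
--     def go(tags, budget):
--         if not tags or len(tags[0]) + 1 > budget: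
--             return []
--         return [tags[0]] + go(tags[1:], budget - len(tags[0]) - 1)
--     return go(tag_string.split(' '), max_length)
-- ===== Notes on version B (the rewrite author's own statement) =====
-- stated objective: alternative
-- what changed: Replaces the iterative scan-and-break loop with two accumulators (result list, running length) by a structural recursion on the tag list that threads a single remaining budget and builds the result front-to-back with no accumulator.
import Mathlib
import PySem

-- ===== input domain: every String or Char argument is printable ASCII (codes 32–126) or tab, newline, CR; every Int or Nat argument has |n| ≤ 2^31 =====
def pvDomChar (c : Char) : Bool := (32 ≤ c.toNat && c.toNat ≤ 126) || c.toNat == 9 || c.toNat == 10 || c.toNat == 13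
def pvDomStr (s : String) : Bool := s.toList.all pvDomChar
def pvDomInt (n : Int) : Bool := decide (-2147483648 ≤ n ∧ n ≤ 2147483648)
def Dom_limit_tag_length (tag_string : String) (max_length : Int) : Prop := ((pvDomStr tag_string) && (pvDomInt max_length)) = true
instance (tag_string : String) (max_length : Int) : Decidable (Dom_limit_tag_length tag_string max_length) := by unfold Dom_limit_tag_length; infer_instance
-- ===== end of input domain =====

-- B changes the decomposition: a budget-threading structural recursion instead of A's
-- scan-and-break loop with result/length accumulators ("alternative", not faster).

-- ===== PORT A =====
-- the for-loop with break: state = (limited_tags, current_length)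
def pvALoop (max_length : Int) : List String → List String → Int → List String
  | [], limited_tags, _ => limited_tags
  | tag :: rest, limited_tags, current_length =>
    if current_length + PySem.Str.len tag + 1 ≤ max_length then
      pvALoop max_length rest (limited_tags ++ [tag]) (current_length + PySem.Str.len tag + 1)
    else limited_tags

def limit_tag_length (tag_string : String) (max_length : Int) : List String :=
  pvALoop max_length ((PySem.Str.split? tag_string " ").getD []) [] 0

-- ===== PORT B =====
-- go(tags, budget) from Source B
def pvBGo : List String → Int → List String
  | [], _ => []
  | t :: rest, budget =>
    if PySem.Str.len t + 1 > budget then []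
    else t :: pvBGo rest (budget - PySem.Str.len t - 1)

def limit_tag_length_alt (tag_string : String) (max_length : Int) : List String :=
  pvBGo ((PySem.Str.split? tag_string " ").getD []) max_length

-- ===== PRECONDITION & SPEC =====
def Spec_limit_tag_length (tag_string : String) (max_length : Int) (out : List String) : Prop := out = limit_tag_length_alt tag_string max_length
instance (tag_string : String) (max_length : Int) (out : List String) : Decidable (Spec_limit_tag_length tag_string max_length out) := by unfold Spec_limit_tag_length; infer_instance

-- ===== CLAIM (what is proved, stated in full; the proofs are below) =====
def Claim_equal_limit_tag_length : Prop := ∀ (tag_string : String) (max_length : Int), Dom_limit_tag_length tag_string max_length → Spec_limit_tag_length tag_string max_length (limit_tag_length tag_string max_length)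

-- ===== LEMMAS AND PROOFS =====

-- loop invariant: A's loop from state (acc, cur) appends exactly B's recursion on budget max - cur
theorem pvALoop_eq (max_length : Int) (tags : List String) :
    ∀ (acc : List String) (cur : Int),
      pvALoop max_length tags acc cur = acc ++ pvBGo tags (max_length - cur) := by
  induction tags with
  | nil => intro acc cur; simp [pvALoop, pvBGo]
  | cons t rest ih =>
    intro acc cur
    by_cases h : cur + PySem.Str.len t + 1 ≤ max_length
    · rw [pvALoop, if_pos h, ih, pvBGo, if_neg (by omega)]
      have h2 : max_length - (cur + PySem.Str.len t + 1) = max_length - cur - PySem.Str.len t - 1 := by omega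
      rw [h2]
      simp
    · rw [pvALoop, if_neg h, pvBGo, if_pos (by omega)]
      simp

-- ===== VERDICT (by name: the statement is the Claim_ definition above) =====
theorem limit_tag_length_spec : Claim_equal_limit_tag_length := by
  intro tag_string max_length _
  unfold Spec_limit_tag_length limit_tag_length limit_tag_length_alt
  rw [pvALoop_eq]
  simp
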